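-- pv_equiv track=rewrite | github.com/kimshef4syq/pj-py | 02_ur_control/RPS/Lib/Python/RVBUST/RPS/RVDFUtils/ReplaceName.py | ReplaceJointName
-- ===== SOURCE A (Python) =====
-- joint_old_name_1 = ["joint_1", "joint_2",
--                     "joint_3", "joint_4", "joint_5", "joint_6"]
--
-- joint_old_name_2 = ["joint_s", "joint_l",
--                     "joint_u", "joint_r", "joint_b", "joint_t"]
--
-- joint_old_name_3 = ["joint_1_s", "joint_2_l",
--                     "joint_3_u", "joint_4_r", "joint_5_b", "joint_6_t"]
--
-- joint_old_name_4 = ["shoulder_joint", "upperArm_joint",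
--                     "foreArm_joint", "wrist1_joint", "wrist2_joint", "wrist3_joint"]
--
-- joint_new_name = ["Joint1", "Joint2", "Joint3",
--                   "Joint4", "Joint5", "Joint6"]
--
-- def ReplaceJointName(name):
--     for i in range(0, 6):
--         if name == joint_old_name_1[i]:
--             name = joint_new_name[i]
--             break
--         if name == joint_old_name_2[i]:
--             name = joint_new_name[i]
--             break
--         if name == joint_old_name_3[i]:
--             name = joint_new_name[i]
--             break
--         if name == joint_old_name_4[i]:
--             name = joint_new_name[i]
--             break
--
--     return name
-- ===== SOURCE B (Python) =====
-- DIGITS = "123456"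
-- LETTERS = "slurbt"
-- STEMS = ["shoulder", "upperArm", "foreArm", "wrist1", "wrist2", "wrist3"]
-- NEW_NAMES = ["Joint1", "Joint2", "Joint3", "Joint4", "Joint5", "Joint6"]
--
-- def ReplaceJointName(name):
--     # Parse the name instead of scanning alias tables: every old name is either
--     # "joint_" + digit, "joint_" + letter, "joint_" + digit + "_" + matching letter,
--     # or stem + "_joint"; decode the joint index from the string's own structure.
--     idx = -1
--     if name.startswith("joint_"):
--         rest = name[6:]
--         if len(rest) == 1:
--             idx = DIGITS.find(rest)
--             if idx < 0:
--                 idx = LETTERS.find(rest)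
--         elif len(rest) == 3 and rest[1] == "_":
--             k = DIGITS.find(rest[0])
--             if k >= 0 and rest[2] == LETTERS[k]:
--                 idx = k
--     elif name.endswith("_joint"):
--         stem = name[:-6]
--         if stem in STEMS:
--             idx = STEMS.index(stem)
--     if idx >= 0:
--         return NEW_NAMES[idx]
--     return name
-- ===== Notes on version B (the rewrite author's own statement) =====
-- stated objective: alternative
-- what changed: B computes the joint index by parsing the name itself (a 'joint_' prefix followed by a coding digit, letter, or digit_letter pair, or a known stem before a '_joint' suffix) instead of A's indexed scan comparing the name against four six-entry alias lists.
import Mathlib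
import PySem

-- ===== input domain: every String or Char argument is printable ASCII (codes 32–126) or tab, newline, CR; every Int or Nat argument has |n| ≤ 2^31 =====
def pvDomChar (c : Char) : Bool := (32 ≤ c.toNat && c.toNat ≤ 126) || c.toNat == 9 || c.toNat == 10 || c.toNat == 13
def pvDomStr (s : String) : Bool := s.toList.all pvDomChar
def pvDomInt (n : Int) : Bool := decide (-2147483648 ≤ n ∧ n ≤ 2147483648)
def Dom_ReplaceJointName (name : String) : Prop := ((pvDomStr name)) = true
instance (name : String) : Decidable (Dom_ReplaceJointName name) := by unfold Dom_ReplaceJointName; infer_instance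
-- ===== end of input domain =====

-- B decodes the joint index by PARSING the name (prefix/suffix plus the coding characters)
-- instead of A's indexed scan over four alias lists (alternative decomposition, same cost).

-- ===== PORT A =====
def jointOldName1 : List String := ["joint_1", "joint_2", "joint_3", "joint_4", "joint_5", "joint_6"]
def jointOldName2 : List String := ["joint_s", "joint_l", "joint_u", "joint_r", "joint_b", "joint_t"]
def jointOldName3 : List String := ["joint_1_s", "joint_2_l", "joint_3_u", "joint_4_r", "joint_5_b", "joint_6_t"]
def jointOldName4 : List String := ["shoulder_joint", "upperArm_joint", "foreArm_joint", "wrist1_joint", "wrist2_joint", "wrist3_joint"]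
def jointNewName : List String := ["Joint1", "Joint2", "Joint3", "Joint4", "Joint5", "Joint6"]

-- the 'for i in range(0, 6)' loop with its four comparisons and 'break'
def ReplaceJointNameLoop : List Int → String → String
  | [], name => name
  | i :: rest, name =>
    if name == PySem.List.pyGetD jointOldName1 i "" then PySem.List.pyGetD jointNewName i ""
    else if name == PySem.List.pyGetD jointOldName2 i "" then PySem.List.pyGetD jointNewName i ""
    else if name == PySem.List.pyGetD jointOldName3 i "" then PySem.List.pyGetD jointNewName i ""
    else if name == PySem.List.pyGetD jointOldName4 i "" then PySem.List.pyGetD jointNewName i ""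
    else ReplaceJointNameLoop rest name

def ReplaceJointName (name : String) : String :=
  ReplaceJointNameLoop (PySem.List.pyRange 0 6 1) name

-- ===== PORT B =====
def digitsS : String := "123456"
def lettersS : String := "slurbt"
def stemsB : List String := ["shoulder", "upperArm", "foreArm", "wrist1", "wrist2", "wrist3"]
def newNamesB : List String := ["Joint1", "Joint2", "Joint3", "Joint4", "Joint5", "Joint6"]

def ReplaceJointName_alt (name : String) : String :=
  let idx : Int :=
    if PySem.Str.startswith name "joint_" then
      let rest := PySem.Str.slice name (some 6) none
      if PySem.Str.len rest == 1 then
        let i := PySem.Str.find digitsS rest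
        if i < 0 then PySem.Str.find lettersS rest else i
      else if PySem.Str.len rest == 3 && (PySem.Str.pyGet? rest 1 == some '_') then
        -- Source B feeds/compares the one-char strings rest[0] and rest[2]; len(rest) = 3 here, so
        -- rest[0] is the slice rest[0:1] and 'rest[2] == LETTERS[k]' is a char comparison (exact)
        let k := PySem.Str.find digitsS (PySem.Str.slice rest (some 0) (some 1))
        if 0 ≤ k && (PySem.Str.pyGet? rest 2 == PySem.List.pyGet? lettersS.toList k) then k else -1
      else (-1 : Int)
    else if PySem.Str.endswith name "_joint" then
      let stem := PySem.Str.slice name none (some (-6))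
      if stem ∈ stemsB then (((PySem.List.index? stemsB stem).getD 0 : Nat) : Int) else -1
    else (-1 : Int)
  -- NEW_NAMES[idx]; the .getD default is unreachable (0 ≤ idx only with idx < 6)
  if 0 ≤ idx then (PySem.List.pyGet? newNamesB idx).getD name else name

-- ===== PRECONDITION & SPEC =====
def Spec_ReplaceJointName (name : String) (out : String) : Prop := out = ReplaceJointName_alt name
instance (name : String) (out : String) : Decidable (Spec_ReplaceJointName name out) := by unfold Spec_ReplaceJointName; infer_instance

-- ===== CLAIM (what is proved, stated in full; the proofs are below) =====
def Claim_equal_ReplaceJointName : Prop := ∀ (name : String), Dom_ReplaceJointName name → Spec_ReplaceJointName name (ReplaceJointName name)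

-- ===== LEMMAS AND PROOFS =====
-- all 24 old names, for the case split in the proof
def allOldNames : List String := jointOldName1 ++ jointOldName2 ++ jointOldName3 ++ jointOldName4

theorem equal_of_mem (name : String) (h : name ∈ allOldNames) :
    ReplaceJointName name = ReplaceJointName_alt name := by
  simp only [allOldNames, jointOldName1, jointOldName2, jointOldName3, jointOldName4,
    List.cons_append, List.nil_append, List.mem_cons,
    List.not_mem_nil, or_false] at h
  rcases h with rfl|rfl|rfl|rfl|rfl|rfl|rfl|rfl|rfl|rfl|rfl|rfl|rfl|rfl|rfl|rfl|rfl|rfl|rfl|rfl|rfl|rfl|rfl|rfl <;> decide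

theorem A_id (name : String) (h : name ∉ allOldNames) : ReplaceJointName name = name := by
  simp only [allOldNames, jointOldName1, jointOldName2, jointOldName3, jointOldName4,
    List.cons_append, List.nil_append, List.mem_cons,
    List.not_mem_nil, or_false, not_or] at h
  obtain ⟨h1,h2,h3,h4,h5,h6,h7,h8,h9,h10,h11,h12,h13,h14,h15,h16,h17,h18,h19,h20,h21,h22,h23,h24⟩ := h
  simp [ReplaceJointName, ReplaceJointNameLoop,
    show PySem.List.pyRange 0 6 1 = [0, 1, 2, 3, 4, 5] from by decide,
    jointOldName1, jointOldName2, jointOldName3, jointOldName4,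
    PySem.List.pyGetD, PySem.List.pyGet?, PySem.List.pyIdx?, beq_iff_eq,
    h1, h2, h3, h4, h5, h6, h7, h8, h9, h10, h11, h12, h13, h14, h15, h16, h17, h18,
    h19, h20, h21, h22, h23, h24]

theorem find_digit (c : Char) :
    PySem.Chars.find digitsS.toList [c] =
      if c = '1' then 0 else if c = '2' then 1 else if c = '3' then 2
      else if c = '4' then 3 else if c = '5' then 4 else if c = '6' then 5 else -1 := by
  simp [digitsS, PySem.Chars.find, PySem.Chars.find.go, List.isPrefixOf]

theorem find_letter (c : Char) :
    PySem.Chars.find lettersS.toList [c] =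
      if c = 's' then 0 else if c = 'l' then 1 else if c = 'u' then 2
      else if c = 'r' then 3 else if c = 'b' then 4 else if c = 't' then 5 else -1 := by
  simp [lettersS, PySem.Chars.find, PySem.Chars.find.go, List.isPrefixOf]

theorem B_id (name : String) (h : name ∉ allOldNames) : ReplaceJointName_alt name = name := by
  have hname : ∀ (s : String), name.toList = s.toList → s ∈ allOldNames → False :=
    fun s hsl hm => h (String.toList_inj.mp hsl ▸ hm)
  unfold ReplaceJointName_alt
  by_cases hs : PySem.Str.startswith name "joint_" = true
  · have hsC : PySem.Chars.startswith name.toList ['j','o','i','n','t','_'] = true := by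
      rw [PySem.Str.startswith_eq] at hs; exact hs
    have hpre : ['j','o','i','n','t','_'] <+: name.toList :=
      (PySem.Chars.startswith_iff _ _).mp hsC
    obtain ⟨t, ht⟩ := hpre
    have hsl : PySem.List.slice name.toList (some 6) none = t := by
      rw [PySem.List.slice_from name.toList (by norm_num : (0:Int) ≤ (6:Int)), ← ht]
      rfl
    match t, ht, hsl with
    | [c], ht, hsl =>
      have n1 : c ≠ '1' := fun he => hname "joint_1" (by rw [← ht, he]; decide) (by decide)
      have n2 : c ≠ '2' := fun he => hname "joint_2" (by rw [← ht, he]; decide) (by decide)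
      have n3 : c ≠ '3' := fun he => hname "joint_3" (by rw [← ht, he]; decide) (by decide)
      have n4 : c ≠ '4' := fun he => hname "joint_4" (by rw [← ht, he]; decide) (by decide)
      have n5 : c ≠ '5' := fun he => hname "joint_5" (by rw [← ht, he]; decide) (by decide)
      have n6 : c ≠ '6' := fun he => hname "joint_6" (by rw [← ht, he]; decide) (by decide)
      have m1 : c ≠ 's' := fun he => hname "joint_s" (by rw [← ht, he]; decide) (by decide)
      have m2 : c ≠ 'l' := fun he => hname "joint_l" (by rw [← ht, he]; decide) (by decide)
      have m3 : c ≠ 'u' := fun he => hname "joint_u" (by rw [← ht, he]; decide) (by decide)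
      have m4 : c ≠ 'r' := fun he => hname "joint_r" (by rw [← ht, he]; decide) (by decide)
      have m5 : c ≠ 'b' := fun he => hname "joint_b" (by rw [← ht, he]; decide) (by decide)
      have m6 : c ≠ 't' := fun he => hname "joint_t" (by rw [← ht, he]; decide) (by decide)
      simp [hsC, hsl, find_digit, find_letter, n1,n2,n3,n4,n5,n6,m1,m2,m3,m4,m5,m6]
    | [a, b, c], ht, hsl =>
      by_cases hb : b = '_'
      · subst hb
        have h3p : PySem.List.slice [a, '_', c] none (some 1) = [a] := by
          rw [PySem.List.slice_to _ (by norm_num : (0:Int) ≤ 1)]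
          rfl
        have p1 : ¬(a = '1' ∧ c = 's') := fun ⟨ha, hc⟩ =>
          hname "joint_1_s" (by rw [← ht, ha, hc]; decide) (by decide)
        have p2 : ¬(a = '2' ∧ c = 'l') := fun ⟨ha, hc⟩ =>
          hname "joint_2_l" (by rw [← ht, ha, hc]; decide) (by decide)
        have p3 : ¬(a = '3' ∧ c = 'u') := fun ⟨ha, hc⟩ =>
          hname "joint_3_u" (by rw [← ht, ha, hc]; decide) (by decide)
        have p4 : ¬(a = '4' ∧ c = 'r') := fun ⟨ha, hc⟩ =>
          hname "joint_4_r" (by rw [← ht, ha, hc]; decide) (by decide)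
        have p5 : ¬(a = '5' ∧ c = 'b') := fun ⟨ha, hc⟩ =>
          hname "joint_5_b" (by rw [← ht, ha, hc]; decide) (by decide)
        have p6 : ¬(a = '6' ∧ c = 't') := fun ⟨ha, hc⟩ =>
          hname "joint_6_t" (by rw [← ht, ha, hc]; decide) (by decide)
        by_cases ha1 : a = '1'
        · subst ha1
          have hc : c ≠ 's' := fun hc => p1 ⟨rfl, hc⟩
          simp [hsC, hsl, h3p, find_digit, lettersS, PySem.List.pyGet?, PySem.List.pyIdx?, hc]
        by_cases ha2 : a = '2'
        · subst ha2
          have hc : c ≠ 'l' := fun hc => p2 ⟨rfl, hc⟩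
          simp [hsC, hsl, h3p, find_digit, lettersS, PySem.List.pyGet?, PySem.List.pyIdx?, hc]
        by_cases ha3 : a = '3'
        · subst ha3
          have hc : c ≠ 'u' := fun hc => p3 ⟨rfl, hc⟩
          simp [hsC, hsl, h3p, find_digit, lettersS, PySem.List.pyGet?, PySem.List.pyIdx?, hc]
        by_cases ha4 : a = '4'
        · subst ha4
          have hc : c ≠ 'r' := fun hc => p4 ⟨rfl, hc⟩
          simp [hsC, hsl, h3p, find_digit, lettersS, PySem.List.pyGet?, PySem.List.pyIdx?, hc]
        by_cases ha5 : a = '5'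
        · subst ha5
          have hc : c ≠ 'b' := fun hc => p5 ⟨rfl, hc⟩
          simp [hsC, hsl, h3p, find_digit, lettersS, PySem.List.pyGet?, PySem.List.pyIdx?, hc]
        by_cases ha6 : a = '6'
        · subst ha6
          have hc : c ≠ 't' := fun hc => p6 ⟨rfl, hc⟩
          simp [hsC, hsl, h3p, find_digit, lettersS, PySem.List.pyGet?, PySem.List.pyIdx?, hc]
        simp [hsC, hsl, h3p, find_digit, ha1, ha2, ha3, ha4, ha5, ha6]
      · simp [hsC, hsl, PySem.List.pyGet?, PySem.List.pyIdx?, hb]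
    | [], ht, hsl => simp [hsC, hsl]
    | [a, b], ht, hsl => simp [hsC, hsl, PySem.List.pyGet?, PySem.List.pyIdx?]
    | a :: b :: c :: d :: r, ht, hsl =>
      simp [hsC, hsl]
      omega
  · have hsC : PySem.Chars.startswith name.toList ['j','o','i','n','t','_'] = false := by
      rw [PySem.Str.startswith_eq] at hs; exact Bool.not_eq_true _ ▸ Bool.of_not_eq_true hs
    by_cases he : PySem.Str.endswith name "_joint" = true
    · have heC : PySem.Chars.endswith name.toList ['_','j','o','i','n','t'] = true := by
        rw [PySem.Str.endswith_eq] at he; exact he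
      have hsuf : ['_','j','o','i','n','t'] <:+ name.toList :=
        (PySem.Chars.endswith_iff _ _).mp heC
      obtain ⟨st, hst⟩ := hsuf
      have hstem : (PySem.Str.slice name none (some (-6))).toList = st := by
        rw [PySem.Str.toList_slice, PySem.Chars.slice_eq_listSlice,
          PySem.List.slice_to_neg_ofNat name.toList 6 (by norm_num), ← hst]
        simp [List.length_append]
      by_cases hm : (PySem.Str.slice name none (some (-6))) ∈ stemsB
      · exfalso
        simp only [stemsB, List.mem_cons, List.not_mem_nil, or_false] at hm
        have hstl := hstem
        rcases hm with hm|hm|hm|hm|hm|hm <;> rw [hm] at hstl <;>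
          [exact hname "shoulder_joint" (by rw [← hst, ← hstl]; decide) (by decide);
           exact hname "upperArm_joint" (by rw [← hst, ← hstl]; decide) (by decide);
           exact hname "foreArm_joint" (by rw [← hst, ← hstl]; decide) (by decide);
           exact hname "wrist1_joint" (by rw [← hst, ← hstl]; decide) (by decide);
           exact hname "wrist2_joint" (by rw [← hst, ← hstl]; decide) (by decide);
           exact hname "wrist3_joint" (by rw [← hst, ← hstl]; decide) (by decide)]
      · simp [hsC, heC, hm]
    · have heC : PySem.Chars.endswith name.toList ['_','j','o','i','n','t'] = false := by
        rw [PySem.Str.endswith_eq] at he; exact Bool.not_eq_true _ ▸ Bool.of_not_eq_true he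
      simp [hsC, heC]

-- ===== VERDICT (by name: the statement is the Claim_ definition above) =====
theorem ReplaceJointName_spec : Claim_equal_ReplaceJointName := by
  intro name _
  unfold Spec_ReplaceJointName
  by_cases h : name ∈ allOldNames
  · exact equal_of_mem name h
  · rw [A_id name h, B_id name h]
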